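-- pv_equiv track=rewrite | github.com/AviadSar/routed_networks | routed_networks.py | indexize_data
-- ===== SOURCE A (Python) =====
-- def mask_sentence(sentence, token_to_idx, len_max_sentence):
--     moves = ["journeyed", "moved", "travelled", "went", "went back"]
--     grabs = ["grabbed", "got", "took", "picked up"]
--     drops = ["discarded", "dropped", "left", "put down"]
--
--     mask = [0] * (3 * len_max_sentence)
--
--     word_padding_size = max(0, len_max_sentence - len(sentence))
--     masked_sentence = [token_to_idx[w] for w in sentence] + [0] * word_padding_size
--
--     for move in moves:
--         if move in sentence:
--             mask[0:len_max_sentence] = masked_sentence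
--             return mask
--     for grab in grabs:
--         if grab in sentence:
--             mask[len_max_sentence: 2 * len_max_sentence] = masked_sentence
--             return mask
--     for drop in drops:
--         if drop in sentence:
--             mask[2 * len_max_sentence:] = masked_sentence
--             return mask
--     raise ValueError("No valid mask")
--
-- def indexize_data(data, token_to_idx, len_max_sentence):
--     indexed_data = []
--
--     for story, query, answer in data:
--         indexed_story = []
--         for sentence in story:
--             masked_sentence = mask_sentence(sentence, token_to_idx, len_max_sentence)
--             indexed_story.append(masked_sentence)
--
--
--         word_padding_size = max(0, len_max_sentence - len(query))
--         indexed_query = [token_to_idx[w] for w in query] + [0] * word_padding_size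
--
--         indexed_answer = token_to_idx[answer[0]]
--
--         indexed_data.append((indexed_story, indexed_query, indexed_answer))
--
--     indexed_data.sort(key=lambda tuple: len(tuple[0]))
--     return indexed_data
-- ===== SOURCE B (Python) =====
-- def mask_sentence(sentence, token_to_idx, len_max_sentence):
--     moves = ["journeyed", "moved", "travelled", "went", "went back"]
--     grabs = ["grabbed", "got", "took", "picked up"]
--     drops = ["discarded", "dropped", "left", "put down"]
--     regions = {kw: r for r, kws in enumerate([moves, grabs, drops]) for kw in kws}
--
--     mask = [0] * (3 * len_max_sentence)
--     word_padding_size = max(0, len_max_sentence - len(sentence))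
--     masked_sentence = [token_to_idx[w] for w in sentence] + [0] * word_padding_size
--
--     hits = [regions[w] for w in sentence if w in regions]
--     if not hits:
--         raise ValueError("No valid mask")
--     r = min(hits)
--     mask[r * len_max_sentence:(r + 1) * len_max_sentence] = masked_sentence
--     return mask
--
-- def indexize_data(data, token_to_idx, len_max_sentence):
--     indexed = [
--         (
--             [mask_sentence(sentence, token_to_idx, len_max_sentence) for sentence in story],
--             [token_to_idx[w] for w in query] + [0] * max(0, len_max_sentence - len(query)),
--             token_to_idx[answer[0]],
--         )
--         for story, query, answer in data
--     ]
--     return sorted(indexed, key=lambda t: len(t[0]))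
-- ===== Notes on version B (the rewrite author's own statement) =====
-- stated objective: simpler
-- what changed: mask_sentence's three sequential keyword-list scans (moves, then grabs, then drops, each with its own slice assignment and early return) are replaced by one keyword-to-region dict: the regions of all matching words are collected in one pass over the sentence and the slice at min(regions) is assigned, preserving the move>grab>drop priority; the per-story loop and story list are built by comprehensions instead of append loops.
import Mathlib
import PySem

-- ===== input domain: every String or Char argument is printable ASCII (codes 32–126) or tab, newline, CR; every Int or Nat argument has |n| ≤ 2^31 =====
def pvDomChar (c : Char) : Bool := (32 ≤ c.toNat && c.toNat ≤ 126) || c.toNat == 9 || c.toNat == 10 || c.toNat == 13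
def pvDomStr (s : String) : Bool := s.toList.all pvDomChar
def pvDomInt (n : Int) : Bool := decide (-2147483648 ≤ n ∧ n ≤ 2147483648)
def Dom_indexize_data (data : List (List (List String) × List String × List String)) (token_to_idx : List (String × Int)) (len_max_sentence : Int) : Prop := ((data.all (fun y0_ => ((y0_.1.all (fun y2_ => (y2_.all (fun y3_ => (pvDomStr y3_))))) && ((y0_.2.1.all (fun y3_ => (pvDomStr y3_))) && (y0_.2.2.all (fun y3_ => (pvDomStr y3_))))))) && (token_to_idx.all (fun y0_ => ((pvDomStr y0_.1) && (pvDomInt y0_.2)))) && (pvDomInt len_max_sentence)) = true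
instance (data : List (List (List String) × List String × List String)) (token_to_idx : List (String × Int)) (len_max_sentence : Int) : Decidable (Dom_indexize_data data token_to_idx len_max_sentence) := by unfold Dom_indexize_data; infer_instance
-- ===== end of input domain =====

-- B replaces mask_sentence's three sequential keyword scans by one keyword→region dict,
-- collecting each word's region and assigning the slice at min(regions) (objective: simpler).
-- Equivalence of the RETURN value is proved on Pre_ (inputs where A raises no exception).

-- ===== PORT A =====
def pvMoves : List String := ["journeyed", "moved", "travelled", "went", "went back"]
def pvGrabs : List String := ["grabbed", "got", "took", "picked up"]
def pvDrops : List String := ["discarded", "dropped", "left", "put down"]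

-- token_to_idx[w]: first-match lookup in the association list (Pre_ guarantees the key is present)
def pvLookup (token_to_idx : List (String × Int)) (w : String) : Int :=
  match token_to_idx.find? (fun q => q.1 == w) with
  | some q => q.2
  | none => 0

-- [token_to_idx[w] for w in sentence] + [0] * max(0, len_max_sentence - len(sentence))
def pvMasked (sentence : List String) (token_to_idx : List (String × Int)) (len_max_sentence : Int) : List Int :=
  sentence.map (pvLookup token_to_idx) ++ List.replicate (max 0 (len_max_sentence - sentence.length)).toNat (0 : Int)

-- A's mask_sentence; the final 'raise ValueError' branch is excluded by Pre_ (returns mask there)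
def pvMaskSentence (sentence : List String) (token_to_idx : List (String × Int)) (len_max_sentence : Int) : List Int :=
  let mask : List Int := List.replicate (3 * len_max_sentence).toNat 0
  let masked := pvMasked sentence token_to_idx len_max_sentence
  if pvMoves.any (fun kw => sentence.contains kw) then
    PySem.List.slice mask none (some 0) ++ masked ++ PySem.List.slice mask (some len_max_sentence) none
  else if pvGrabs.any (fun kw => sentence.contains kw) then
    PySem.List.slice mask none (some len_max_sentence) ++ masked ++ PySem.List.slice mask (some (2 * len_max_sentence)) none
  else if pvDrops.any (fun kw => sentence.contains kw) then
    PySem.List.slice mask none (some (2 * len_max_sentence)) ++ masked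
  else mask

def indexize_data (data : List (List (List String) × List String × List String)) (token_to_idx : List (String × Int)) (len_max_sentence : Int) : List (List (List Int) × List Int × Int) :=
  let indexed_data := data.foldl (fun acc sqa =>
    let indexed_story := sqa.1.foldl (fun sacc sentence => sacc ++ [pvMaskSentence sentence token_to_idx len_max_sentence]) []
    let indexed_query := sqa.2.1.map (pvLookup token_to_idx) ++ List.replicate (max 0 (len_max_sentence - sqa.2.1.length)).toNat (0 : Int)
    let indexed_answer := pvLookup token_to_idx sqa.2.2.headI   -- answer[0]; Pre_ guarantees answer ≠ []
    acc ++ [(indexed_story, indexed_query, indexed_answer)]) []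
  PySem.List.sorted indexed_data (fun t => t.1.length) false

-- ===== PORT B =====
-- regions = {kw: r for r, kws in enumerate([moves, grabs, drops]) for kw in kws}
def pvRegions : PySem.Dict String Int :=
  PySem.Dict.ofList [("journeyed", 0), ("moved", 0), ("travelled", 0), ("went", 0), ("went back", 0),
                     ("grabbed", 1), ("got", 1), ("took", 1), ("picked up", 1),
                     ("discarded", 2), ("dropped", 2), ("left", 2), ("put down", 2)]

-- B's mask_sentence; min over the matched regions, empty hits (ValueError) excluded by Pre_
def pvMaskSentenceAlt (sentence : List String) (token_to_idx : List (String × Int)) (len_max_sentence : Int) : List Int :=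
  let mask : List Int := List.replicate (3 * len_max_sentence).toNat 0
  let masked := pvMasked sentence token_to_idx len_max_sentence
  let hits := sentence.filterMap (fun w => pvRegions.get? w)
  if hits.isEmpty then mask   -- 'raise ValueError("No valid mask")': excluded by Pre_
  else
    let r := (PySem.List.min? hits (fun x => x)).getD 0   -- r = min(hits); hits is nonempty here
    PySem.List.slice mask none (some (r * len_max_sentence)) ++ masked ++
    PySem.List.slice mask (some ((r + 1) * len_max_sentence)) none

def indexize_data_alt (data : List (List (List String) × List String × List String)) (token_to_idx : List (String × Int)) (len_max_sentence : Int) : List (List (List Int) × List Int × Int) :=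
  PySem.List.sorted
    (data.map (fun sqa =>
      (sqa.1.map (fun sentence => pvMaskSentenceAlt sentence token_to_idx len_max_sentence),
       sqa.2.1.map (pvLookup token_to_idx) ++ List.replicate (max 0 (len_max_sentence - sqa.2.1.length)).toNat (0 : Int),
       pvLookup token_to_idx sqa.2.2.headI)))
    (fun t => t.1.length) false

-- ===== PRECONDITION & SPEC =====
def pvKeywords : List String := pvMoves ++ pvGrabs ++ pvDrops
def pvHasKey (token_to_idx : List (String × Int)) (w : String) : Bool := token_to_idx.any (fun q => q.1 == w)

-- Pre_: exactly the inputs on which Python A returns (no KeyError from token_to_idx, no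
-- IndexError from answer[0], and every story sentence contains some move/grab/drop keyword,
-- so mask_sentence's 'raise ValueError' is never reached).
def Pre_indexize_data (data : List (List (List String) × List String × List String)) (token_to_idx : List (String × Int)) (len_max_sentence : Int) : Prop :=
  (data.all (fun sqa =>
      sqa.1.all (fun s => s.all (pvHasKey token_to_idx) && s.any (fun w => pvKeywords.contains w)) &&
      sqa.2.1.all (pvHasKey token_to_idx) &&
      (!sqa.2.2.isEmpty) && pvHasKey token_to_idx sqa.2.2.headI)) = true
instance (data : List (List (List String) × List String × List String)) (token_to_idx : List (String × Int)) (len_max_sentence : Int) : Decidable (Pre_indexize_data data token_to_idx len_max_sentence) := by unfold Pre_indexize_data; infer_instance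

def pvWitness_indexize_data : (List (List (List String) × List String × List String)) × (List (String × Int)) × Int :=
  ([([["mary", "went", "home"]], ["where", "mary"], ["home"])],
   [("mary", 1), ("went", 2), ("home", 3), ("where", 4)], 3)

def Spec_indexize_data (data : List (List (List String) × List String × List String)) (token_to_idx : List (String × Int)) (len_max_sentence : Int) (out : List (List (List Int) × List Int × Int)) : Prop := out = indexize_data_alt data token_to_idx len_max_sentence
instance (data : List (List (List String) × List String × List String)) (token_to_idx : List (String × Int)) (len_max_sentence : Int) (out : List (List (List Int) × List Int × Int)) : Decidable (Spec_indexize_data data token_to_idx len_max_sentence out) := by unfold Spec_indexize_data; infer_instance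

-- ===== CLAIM (what is proved, stated in full; the proofs are below) =====
def Claim_equal_indexize_data : Prop := ∀ (data : List (List (List String) × List String × List String)) (token_to_idx : List (String × Int)) (len_max_sentence : Int), Dom_indexize_data data token_to_idx len_max_sentence → Pre_indexize_data data token_to_idx len_max_sentence → Spec_indexize_data data token_to_idx len_max_sentence (indexize_data data token_to_idx len_max_sentence)

-- ===== LEMMAS AND PROOFS =====

theorem pvWitness_ok : Dom_indexize_data pvWitness_indexize_data.1 pvWitness_indexize_data.2.1 pvWitness_indexize_data.2.2 ∧ Pre_indexize_data pvWitness_indexize_data.1 pvWitness_indexize_data.2.1 pvWitness_indexize_data.2.2 := by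
  constructor <;> decide

-- what pvRegions.get? computes, as membership in the three keyword lists
theorem pvRegions_get? (w : String) :
    pvRegions.get? w =
      (if w ∈ pvMoves then some 0 else if w ∈ pvGrabs then some 1
       else if w ∈ pvDrops then some 2 else none) := by
  have h : pvRegions = PySem.Dict.mk [("journeyed", 0), ("moved", 0), ("travelled", 0), ("went", 0), ("went back", 0),
                     ("grabbed", 1), ("got", 1), ("took", 1), ("picked up", 1),
                     ("discarded", 2), ("dropped", 2), ("left", 2), ("put down", 2)] := by rfl
  rw [h]
  by_cases h1 : w = "journeyed"
  · subst h1; decide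
  by_cases h2 : w = "moved"
  · subst h2; decide
  by_cases h3 : w = "travelled"
  · subst h3; decide
  by_cases h4 : w = "went"
  · subst h4; decide
  by_cases h5 : w = "went back"
  · subst h5; decide
  by_cases h6 : w = "grabbed"
  · subst h6; decide
  by_cases h7 : w = "got"
  · subst h7; decide
  by_cases h8 : w = "took"
  · subst h8; decide
  by_cases h9 : w = "picked up"
  · subst h9; decide
  by_cases h10 : w = "discarded"
  · subst h10; decide
  by_cases h11 : w = "dropped"
  · subst h11; decide
  by_cases h12 : w = "left"
  · subst h12; decide
  by_cases h13 : w = "put down"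
  · subst h13; decide
  have n1 : ¬("journeyed" = w) := fun hq => h1 hq.symm
  have n2 : ¬("moved" = w) := fun hq => h2 hq.symm
  have n3 : ¬("travelled" = w) := fun hq => h3 hq.symm
  have n4 : ¬("went" = w) := fun hq => h4 hq.symm
  have n5 : ¬("went back" = w) := fun hq => h5 hq.symm
  have n6 : ¬("grabbed" = w) := fun hq => h6 hq.symm
  have n7 : ¬("got" = w) := fun hq => h7 hq.symm
  have n8 : ¬("took" = w) := fun hq => h8 hq.symm
  have n9 : ¬("picked up" = w) := fun hq => h9 hq.symm
  have n10 : ¬("discarded" = w) := fun hq => h10 hq.symm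
  have n11 : ¬("dropped" = w) := fun hq => h11 hq.symm
  have n12 : ¬("left" = w) := fun hq => h12 hq.symm
  have n13 : ¬("put down" = w) := fun hq => h13 hq.symm
  simp only [PySem.Dict.get?_mk_cons, beq_iff_eq, pvMoves, pvGrabs, pvDrops, List.mem_cons, List.not_mem_nil, or_false, h1, h2, h3, h4, h5, h6, h7, h8, h9, h10, h11, h12, h13, n1, n2, n3, n4, n5, n6, n7, n8, n9, n10, n11, n12, n13, if_neg, not_false_eq_true]
  rfl

-- every collected region index is 0, 1 or 2
theorem hits_mem (sentence : List String) (x : Int)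
    (hx : x ∈ sentence.filterMap (fun w => pvRegions.get? w)) : x = 0 ∨ x = 1 ∨ x = 2 := by
  rw [List.mem_filterMap] at hx
  obtain ⟨w, -, hfw⟩ := hx
  rw [pvRegions_get?] at hfw
  split_ifs at hfw <;> simp_all

-- mask[3L:] of the length-3L zero mask is empty (any sign of L)
theorem pvSliceEnd (L : Int) :
    PySem.List.slice (List.replicate (3 * L).toNat (0 : Int)) (some (3 * L)) none = [] := by
  rw [PySem.List.slice_some_none]
  simp [PySem.List.clampIdx]
  split_ifs <;> omega

-- the dict-and-min mask_sentence agrees with A's three scans on every sentence containing a keyword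
theorem maskSentence_eq (sentence : List String) (token_to_idx : List (String × Int)) (L : Int)
    (hkw : sentence.any (fun w => pvKeywords.contains w) = true) :
    pvMaskSentence sentence token_to_idx L = pvMaskSentenceAlt sentence token_to_idx L := by
  have hmA : (pvMoves.any (fun kw => sentence.contains kw) = true) ↔ ∃ w ∈ sentence, w ∈ pvMoves := by
    simp only [List.any_eq_true, List.contains_iff_mem]
    exact ⟨fun ⟨k, u1, u2⟩ => ⟨k, u2, u1⟩, fun ⟨k, u1, u2⟩ => ⟨k, u2, u1⟩⟩
  have hgA : (pvGrabs.any (fun kw => sentence.contains kw) = true) ↔ ∃ w ∈ sentence, w ∈ pvGrabs := by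
    simp only [List.any_eq_true, List.contains_iff_mem]
    exact ⟨fun ⟨k, u1, u2⟩ => ⟨k, u2, u1⟩, fun ⟨k, u1, u2⟩ => ⟨k, u2, u1⟩⟩
  have hdA : (pvDrops.any (fun kw => sentence.contains kw) = true) ↔ ∃ w ∈ sentence, w ∈ pvDrops := by
    simp only [List.any_eq_true, List.contains_iff_mem]
    exact ⟨fun ⟨k, u1, u2⟩ => ⟨k, u2, u1⟩, fun ⟨k, u1, u2⟩ => ⟨k, u2, u1⟩⟩
  have hkw' : ∃ w ∈ sentence, w ∈ pvMoves ∨ w ∈ pvGrabs ∨ w ∈ pvDrops := by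
    simp only [List.any_eq_true, List.contains_iff_mem] at hkw
    obtain ⟨w, hw, hk⟩ := hkw
    exact ⟨w, hw, by simpa [pvKeywords, List.mem_append, or_assoc] using hk⟩
  have h0iff : (0 : Int) ∈ sentence.filterMap (fun w => pvRegions.get? w) ↔ ∃ w ∈ sentence, w ∈ pvMoves := by
    rw [List.mem_filterMap]
    constructor
    · rintro ⟨w, hw, hf⟩
      rw [pvRegions_get?] at hf
      split_ifs at hf <;> simp_all
      exact ⟨w, hw, by assumption⟩
    · rintro ⟨w, hw, hwm⟩
      exact ⟨w, hw, by rw [pvRegions_get?, if_pos hwm]⟩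
  have h1mem : (1 : Int) ∈ sentence.filterMap (fun w => pvRegions.get? w) → ∃ w ∈ sentence, w ∈ pvGrabs := by
    rw [List.mem_filterMap]
    rintro ⟨w, hw, hf⟩
    rw [pvRegions_get?] at hf
    split_ifs at hf <;> simp_all
    exact ⟨w, hw, by assumption⟩
  simp only [pvMaskSentence, pvMaskSentenceAlt]
  by_cases hm : pvMoves.any (fun kw => sentence.contains kw) = true
  · rw [if_pos hm]
    obtain ⟨w, hw, hwm⟩ := hmA.mp hm
    have h0 : (0 : Int) ∈ sentence.filterMap (fun w => pvRegions.get? w) := h0iff.mpr ⟨w, hw, hwm⟩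
    have hne : (sentence.filterMap (fun w => pvRegions.get? w)).isEmpty ≠ true :=
      fun hE => List.ne_nil_of_mem h0 (List.isEmpty_iff.mp hE)
    rw [if_neg hne]
    rcases hminE : PySem.List.min? (sentence.filterMap (fun w => pvRegions.get? w)) (fun x => x) with _ | r
    · rw [PySem.List.min?_eq_none_iff] at hminE
      simp [hminE] at h0
    · have hub := PySem.List.min?_isMin hminE 0 h0
      have hmemr := hits_mem sentence r (PySem.List.min?_mem hminE)
      have hr : r = 0 := by omega
      rw [hr]
      norm_num
  · rw [if_neg hm]
    have h0n : (0 : Int) ∉ sentence.filterMap (fun w => pvRegions.get? w) := fun h0 => hm (hmA.mpr (h0iff.mp h0))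
    by_cases hg : pvGrabs.any (fun kw => sentence.contains kw) = true
    · rw [if_pos hg]
      obtain ⟨w, hw, hwg⟩ := hgA.mp hg
      have hwm' : w ∉ pvMoves := fun hc => hm (hmA.mpr ⟨w, hw, hc⟩)
      have h1 : (1 : Int) ∈ sentence.filterMap (fun w => pvRegions.get? w) :=
        List.mem_filterMap.mpr ⟨w, hw, by rw [pvRegions_get?, if_neg hwm', if_pos hwg]⟩
      have hne : (sentence.filterMap (fun w => pvRegions.get? w)).isEmpty ≠ true :=
        fun hE => List.ne_nil_of_mem h1 (List.isEmpty_iff.mp hE)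
      rw [if_neg hne]
      rcases hminE : PySem.List.min? (sentence.filterMap (fun w => pvRegions.get? w)) (fun x => x) with _ | r
      · rw [PySem.List.min?_eq_none_iff] at hminE
        simp [hminE] at h1
      · have hub := PySem.List.min?_isMin hminE 1 h1
        have hrmem := PySem.List.min?_mem hminE
        have hmemr := hits_mem sentence r hrmem
        have hr : r = 1 := by
          rcases hmemr with hq | hq | hq
          exacts [absurd (hq ▸ hrmem) h0n, hq, by omega]
        rw [hr]
        norm_num
    · rw [if_neg hg]
      have h1n : (1 : Int) ∉ sentence.filterMap (fun w => pvRegions.get? w) := fun h1 => hg (hgA.mpr (h1mem h1))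
      by_cases hd : pvDrops.any (fun kw => sentence.contains kw) = true
      · rw [if_pos hd]
        obtain ⟨w, hw, hwd⟩ := hdA.mp hd
        have hwm' : w ∉ pvMoves := fun hc => hm (hmA.mpr ⟨w, hw, hc⟩)
        have hwg' : w ∉ pvGrabs := fun hc => hg (hgA.mpr ⟨w, hw, hc⟩)
        have h2 : (2 : Int) ∈ sentence.filterMap (fun w => pvRegions.get? w) :=
          List.mem_filterMap.mpr ⟨w, hw, by rw [pvRegions_get?, if_neg hwm', if_neg hwg', if_pos hwd]⟩
        have hne : (sentence.filterMap (fun w => pvRegions.get? w)).isEmpty ≠ true :=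
          fun hE => List.ne_nil_of_mem h2 (List.isEmpty_iff.mp hE)
        rw [if_neg hne]
        rcases hminE : PySem.List.min? (sentence.filterMap (fun w => pvRegions.get? w)) (fun x => x) with _ | r
        · rw [PySem.List.min?_eq_none_iff] at hminE
          simp [hminE] at h2
        · have hrmem := PySem.List.min?_mem hminE
          have hmemr := hits_mem sentence r hrmem
          have hr : r = 2 := by
            rcases hmemr with hq | hq | hq
            exacts [absurd (hq ▸ hrmem) h0n, absurd (hq ▸ hrmem) h1n, hq]
          rw [hr]
          have h23 : (((some (2:Int)).getD 0) + 1) * L = 3 * L := by norm_num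
          rw [h23, pvSliceEnd]
          norm_num
      · exfalso
        obtain ⟨w, hw, hk⟩ := hkw'
        rcases hk with hq | hq | hq
        exacts [hm (hmA.mpr ⟨w, hw, hq⟩), hg (hgA.mpr ⟨w, hw, hq⟩), hd (hdA.mpr ⟨w, hw, hq⟩)]

-- ===== VERDICT (by name: the statement is the Claim_ definition above) =====
theorem indexize_data_spec : Claim_equal_indexize_data := by
  intro data token_to_idx len_max_sentence _ hpre
  unfold Spec_indexize_data indexize_data indexize_data_alt
  unfold Pre_indexize_data at hpre
  simp only [List.all_eq_true, Bool.and_eq_true] at hpre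
  rw [PySem.List.foldl_append_singleton_eq_map]
  simp only [List.nil_append]
  apply congrArg (fun l : List (List (List Int) × List Int × Int) => PySem.List.sorted l (fun t => t.1.length) false)
  apply List.map_congr_left
  intro sqa hsqa
  obtain ⟨⟨⟨hstory, -⟩, -⟩, -⟩ := hpre sqa hsqa
  refine congrArg₂ Prod.mk ?_ rfl
  rw [PySem.List.foldl_append_singleton_eq_map]
  simp only [List.nil_append]
  apply List.map_congr_left
  intro sentence hs
  obtain ⟨-, hkw⟩ := hstory sentence hs
  exact maskSentence_eq sentence token_to_idx len_max_sentence hkw
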